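-- pv_equiv track=rewrite | github.com/hshk99/Autopack | scripts/handle_connection_errors_ocr.py | get_round_robin_slots
-- ===== SOURCE A (Python) =====
-- from typing import Optional, Dict, List, Tuple
--
-- def get_round_robin_slots(active_slots: set, last_slot: int) -> List[int]:
--     """
--     Return active slots in round-robin order starting after last_slot.
--
--     This ensures fair attention to all slots instead of always starting from slot 1.
--     """
--     sorted_slots = sorted(active_slots)
--     if not sorted_slots:
--         return []
--
--     # Find where to start in the sorted list
--     start_idx = 0
--     for i, slot in enumerate(sorted_slots):
--         if slot > last_slot:
--             start_idx = i
--             break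
--     else:
--         # All slots are <= last_slot, wrap around to start
--         start_idx = 0
--
--     # Return slots in round-robin order
--     return sorted_slots[start_idx:] + sorted_slots[:start_idx]
-- ===== SOURCE B (Python) =====
-- import bisect
-- from typing import List
--
--
-- def get_round_robin_slots(active_slots: set, last_slot: int) -> List[int]:
--     """Return active slots in round-robin order starting after last_slot.
--
--     Binary search (bisect_right) finds the rotation point; when every slot is
--     <= last_slot it returns len(sorted_slots), so the slice concatenation
--     yields the full sorted list and no empty-list guard is needed.
--     """
--     sorted_slots = sorted(active_slots)
--     idx = bisect.bisect_right(sorted_slots, last_slot)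
--     return sorted_slots[idx:] + sorted_slots[:idx]
-- ===== Notes on version B (the rewrite author's own statement) =====
-- stated objective: idiomatic
-- what changed: The linear enumerate-scan with for/else and the empty-list guard are replaced by a single bisect_right binary search over the sorted list; the wrap-around case falls out of the slice arithmetic instead of a special branch.
import Mathlib
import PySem

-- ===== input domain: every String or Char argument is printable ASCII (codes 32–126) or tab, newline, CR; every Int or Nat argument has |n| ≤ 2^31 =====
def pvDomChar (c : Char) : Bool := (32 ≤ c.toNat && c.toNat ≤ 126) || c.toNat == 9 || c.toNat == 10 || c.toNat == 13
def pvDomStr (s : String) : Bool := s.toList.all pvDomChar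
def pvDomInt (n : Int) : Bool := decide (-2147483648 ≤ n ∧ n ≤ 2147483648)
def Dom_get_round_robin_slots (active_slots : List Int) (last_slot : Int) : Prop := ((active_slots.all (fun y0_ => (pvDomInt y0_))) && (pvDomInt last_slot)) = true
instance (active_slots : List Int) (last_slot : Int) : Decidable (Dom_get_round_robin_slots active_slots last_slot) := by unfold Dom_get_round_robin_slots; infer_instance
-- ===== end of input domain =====

-- B replaces A's linear for/else scan (and its empty-list guard) with a bisect_right
-- binary search over the sorted list; same return value, more idiomatic.


-- ===== PORT A =====
-- the 'for i, slot in enumerate(sorted_slots): if slot > last_slot: start_idx = i; break / else: start_idx = 0' loop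
def pvScanA (pairs : List (Int × Int)) (last_slot : Int) : Int :=
  match pairs with
  | [] => 0
  | (i, slot) :: rest => if last_slot < slot then i else pvScanA rest last_slot

def get_round_robin_slots (active_slots : List Int) (last_slot : Int) : List Int :=
  let sorted_slots := PySem.List.sorted active_slots (fun x => x)
  if sorted_slots = [] then []
  else
    let start_idx := pvScanA (PySem.List.enumerate sorted_slots) last_slot
    PySem.List.slice sorted_slots (some start_idx) none ++
      PySem.List.slice sorted_slots none (some start_idx)

-- ===== PORT B =====
def get_round_robin_slots_alt (active_slots : List Int) (last_slot : Int) : List Int :=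
  let sorted_slots := PySem.List.sorted active_slots (fun x => x)
  let idx := PySem.List.bisectRight sorted_slots last_slot   -- bisect.bisect_right
  PySem.List.slice sorted_slots (some (idx : Int)) none ++
    PySem.List.slice sorted_slots none (some (idx : Int))

-- ===== PRECONDITION & SPEC =====
def Spec_get_round_robin_slots (active_slots : List Int) (last_slot : Int) (out : List Int) : Prop := out = get_round_robin_slots_alt active_slots last_slot
instance (active_slots : List Int) (last_slot : Int) (out : List Int) : Decidable (Spec_get_round_robin_slots active_slots last_slot out) := by unfold Spec_get_round_robin_slots; infer_instance

-- ===== CLAIM (what is proved, stated in full; the proofs are below) =====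
def Claim_equal_get_round_robin_slots : Prop := ∀ (active_slots : List Int) (last_slot : Int), Dom_get_round_robin_slots active_slots last_slot → Spec_get_round_robin_slots active_slots last_slot (get_round_robin_slots active_slots last_slot)

-- ===== LEMMAS AND PROOFS =====

-- A's for/else scan over enumerate: it returns the first enumerate index whose slot
-- exceeds last_slot, and 0 when every slot is <= last_slot.
lemma pvScanA_enumerate (last : Int) :
    ∀ (s : List Int) (k : Int),
      pvScanA (PySem.List.enumerate s k) last =
        if (s.takeWhile (fun x => decide (x ≤ last))).length = s.length then 0
        else k + ((s.takeWhile (fun x => decide (x ≤ last))).length : Int) := by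
  intro s
  induction s with
  | nil => intro k; simp [pvScanA, PySem.List.enumerate]
  | cons x xs ih =>
      intro k
      rw [PySem.List.enumerate_cons]
      by_cases hx : last < x
      · have hd : decide (x ≤ last) = false := by simp; omega
        simp [pvScanA, hx, hd]
      · have hd : decide (x ≤ last) = true := by simp; omega
        rw [show pvScanA ((k, x) :: PySem.List.enumerate xs (k + 1)) last
              = pvScanA (PySem.List.enumerate xs (k + 1)) last from by simp [pvScanA, hx],
            ih (k + 1), List.takeWhile_cons, if_pos hd]
        simp only [List.length_cons]
        by_cases h : (List.takeWhile (fun x => decide (x ≤ last)) xs).length = xs.length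
        · simp [h]
        · have h' : ¬ ((List.takeWhile (fun x => decide (x ≤ last)) xs).length + 1
              = xs.length + 1) := by omega
          rw [if_neg h, if_neg h']
          push_cast
          ring

-- elements strictly inside takeWhile satisfy the predicate
lemma takeWhile_getD_le (s : List Int) (last : Int) :
    ∀ i : Nat, i < (s.takeWhile (fun x => decide (x ≤ last))).length → s.getD i 0 ≤ last := by
  induction s with
  | nil => intro i hi; simp at hi
  | cons x xs ih =>
      intro i hi
      by_cases hx : x ≤ last
      · rw [List.takeWhile_cons, if_pos (by simpa using hx)] at hi
        cases i with
        | zero => simpa using hx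
        | succ j => simpa using ih j (by simpa using hi)
      · rw [List.takeWhile_cons, if_neg (by simpa using hx)] at hi
        simp at hi

-- the element right after takeWhile fails the predicate
lemma takeWhile_getD_gt (s : List Int) (last : Int) :
    (s.takeWhile (fun x => decide (x ≤ last))).length < s.length →
      last < s.getD (s.takeWhile (fun x => decide (x ≤ last))).length 0 := by
  induction s with
  | nil => intro h; simp at h
  | cons x xs ih =>
      intro h
      by_cases hx : x ≤ last
      · rw [List.takeWhile_cons, if_pos (by simpa using hx)] at h ⊢
        simpa using ih (by simpa using h)
      · rw [List.takeWhile_cons, if_neg (by simpa using hx)] at h ⊢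
        simpa using hx

-- on the sorted list, bisect_right lands exactly at the takeWhile boundary
lemma bisectRight_eq_takeWhile (s : List Int) (last : Int)
    (hs : s.Pairwise (fun a b => a ≤ b)) :
    PySem.List.bisectRight s last = (s.takeWhile (fun x => decide (x ≤ last))).length := by
  obtain ⟨hle, hbelow, habove⟩ := PySem.List.bisectRight_spec s last hs
  have htlen : (s.takeWhile (fun x => decide (x ≤ last))).length ≤ s.length :=
    (List.takeWhile_prefix _).length_le
  rcases lt_trichotomy (PySem.List.bisectRight s last)
      (s.takeWhile (fun x => decide (x ≤ last))).length with h | h | h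
  · have hrlen : PySem.List.bisectRight s last < s.length := lt_of_lt_of_le h htlen
    have h1 := habove (PySem.List.bisectRight s last) hrlen (le_refl _)
    have h2 := takeWhile_getD_le s last (PySem.List.bisectRight s last) h
    rw [List.getD_eq_getElem s 0 hrlen] at h2
    omega
  · exact h
  · have htl : (s.takeWhile (fun x => decide (x ≤ last))).length < s.length :=
      lt_of_lt_of_le h hle
    have h1 := hbelow (s.takeWhile (fun x => decide (x ≤ last))).length htl h
    have h2 := takeWhile_getD_gt s last htl
    rw [List.getD_eq_getElem s 0 htl] at h2
    omega

-- the two rotations agree on any sorted list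
lemma rotations_eq (s : List Int) (last : Int) (hs : s.Pairwise (fun a b => a ≤ b)) :
    (if s = [] then []
     else PySem.List.slice s (some (pvScanA (PySem.List.enumerate s) last)) none ++
          PySem.List.slice s none (some (pvScanA (PySem.List.enumerate s) last)))
    = PySem.List.slice s (some ((PySem.List.bisectRight s last : Nat) : Int)) none ++
      PySem.List.slice s none (some ((PySem.List.bisectRight s last : Nat) : Int)) := by
  have hb := bisectRight_eq_takeWhile s last hs
  by_cases hnil : s = []
  · subst hnil
    rw [if_pos rfl, PySem.List.slice_from_natCast, PySem.List.slice_to_natCast]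
    simp
  · rw [if_neg hnil, pvScanA_enumerate last s 0]
    by_cases hfull : (s.takeWhile (fun x => decide (x ≤ last))).length = s.length
    · rw [if_pos hfull, hb, hfull,
          PySem.List.slice_from s (le_refl (0:Int)), PySem.List.slice_to s (le_refl (0:Int)),
          PySem.List.slice_from_natCast, PySem.List.slice_to_natCast]
      simp
    · rw [if_neg hfull, hb, zero_add]

-- ===== VERDICT (by name: the statement is the Claim_ definition above) =====
theorem get_round_robin_slots_spec : Claim_equal_get_round_robin_slots := by
  intro active_slots last_slot _
  unfold Spec_get_round_robin_slots
  show get_round_robin_slots active_slots last_slot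
      = get_round_robin_slots_alt active_slots last_slot
  unfold get_round_robin_slots get_round_robin_slots_alt
  exact rotations_eq (PySem.List.sorted active_slots (fun x => x)) last_slot
    (PySem.List.sorted_pairwise active_slots (fun x => x))
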